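-- pv_equiv track=rewrite | github.com/jmmichaud/BioinfoTools | CyclopeptideSequencing.py | PeptideLinearScoring
-- ===== SOURCE A (Python) =====
-- import copy
--
-- def GenerateLinearSpectra(peptidemasses):
--     """Inputs a list of integer masses (min 2 fragments) of a linear peptide.
--     Outpus the expanded spectra (sums of adjacent fragments) as a list of masses"""
--     expandedspectra = []
--     L = len(peptidemasses)
--     for peptide in peptidemasses:
--         expandedspectra.append(peptide)
--     expandedspectra.append(sum(peptidemasses))
--     i = 2
--     while i < L:
--         for n in range(L):
--             mass = peptidemasses[n:n+i]
--             if len(mass) == i: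
--                 masssum = sum(mass)
--                 expandedspectra.append(masssum)
--         i += 1
--     expandedspectra.sort()
--     return expandedspectra
--
-- def PeptideLinearScoring(peptideseq, spectrum):
--     """Inputs a linear peptide as a list of integers (peptideseq)
--     and mass spectra as a list of integers (spectrum).
--     Outputs the score of the peptide generated spectrum against the
--     inputted spectrum.
--     Each match of the peptide generated spectrum to the inputted spectrum yields
--     one point.
--     """
--     if peptideseq == []:
--         return 0
--     else:
--         peptidemasses = GenerateLinearSpectra(peptideseq)
--         score = 0
--         specdup = copy.deepcopy(spectrum)
--         for spec in peptidemasses: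
--             if spec in specdup:
--                 score += 1
--                 specdup.remove(spec) #remove mass from spectrum to avoid duplicates
--         return score
-- ===== SOURCE B (Python) =====
-- def PeptideLinearScoring(peptideseq, spectrum):
--     if not peptideseq:
--         return 0
--     L = len(peptideseq)
--     # prefix sums: P[i] = sum of the first i masses
--     P = [0]
--     t = 0
--     for m in peptideseq:
--         t += m
--         P.append(t)
--     # fragment multiset as a counting dict: single residues, the whole
--     # peptide's mass, and internal windows of length 2..L-1 via prefix sums
--     frags = {}
--     for m in peptideseq:
--         frags[m] = frags.get(m, 0) + 1
--     frags[t] = frags.get(t, 0) + 1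
--     for length in range(2, L):
--         for a, b in zip(P, P[length:]):
--             v = b - a
--             frags[v] = frags.get(v, 0) + 1
--     # multiset-intersection score against a counting dict of the spectrum
--     speccnt = {}
--     for s in spectrum:
--         speccnt[s] = speccnt.get(s, 0) + 1
--     return sum(min(c, speccnt.get(v, 0)) for v, c in frags.items())
-- ===== Notes on version B (the rewrite author's own statement) =====
-- stated objective: faster
-- what changed: B generates the theoretical spectrum with prefix sums (each window sum in O(1) instead of slicing and re-summing, and no sort) and scores by multiset intersection of two counting dicts instead of A's per-fragment membership scan and remove() over a copied spectrum.
import Mathlib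
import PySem

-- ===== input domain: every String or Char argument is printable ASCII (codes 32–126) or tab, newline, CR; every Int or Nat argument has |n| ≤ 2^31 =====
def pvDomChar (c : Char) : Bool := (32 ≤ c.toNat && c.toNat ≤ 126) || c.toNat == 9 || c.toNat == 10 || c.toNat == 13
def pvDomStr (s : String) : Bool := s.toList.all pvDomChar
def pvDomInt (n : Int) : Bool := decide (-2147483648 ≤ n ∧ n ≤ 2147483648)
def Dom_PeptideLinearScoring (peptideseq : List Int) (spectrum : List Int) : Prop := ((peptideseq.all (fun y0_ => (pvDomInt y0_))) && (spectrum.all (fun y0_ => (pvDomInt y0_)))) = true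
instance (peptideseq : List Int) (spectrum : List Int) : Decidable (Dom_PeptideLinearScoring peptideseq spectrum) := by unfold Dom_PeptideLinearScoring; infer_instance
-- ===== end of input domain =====

-- B replaces A's O(L^3) slice-and-sum spectrum generation by prefix sums and A's
-- O(F·n) membership-and-remove scoring by counting dicts (multiset intersection).

-- ===== PORT A =====
-- GenerateLinearSpectra: elements, the total mass, then windows of length 2..L-1
-- via slices, finally sorted.
def GenerateLinearSpectra (peptidemasses : List Int) : List Int :=
  let L : Int := peptidemasses.length
  let es := peptidemasses.foldl (fun acc p => acc ++ [p]) []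
  let es := es ++ [peptidemasses.sum]
  -- i = 2; while i < L: for n in range(L): …; i += 1
  let es := (PySem.List.pyRange 2 L 1).foldl (fun acc i =>
      (PySem.List.pyRange 0 L 1).foldl (fun acc n =>
        let mass := PySem.List.slice peptidemasses (some n) (some (n + i))
        if (mass.length : Int) = i then acc ++ [mass.sum] else acc) acc) es
  PySem.List.sorted es (fun x => x) false

def PeptideLinearScoring (peptideseq : List Int) (spectrum : List Int) : Int :=
  if peptideseq = [] then 0
  else
    let peptidemasses := GenerateLinearSpectra peptideseq
    -- for spec in peptidemasses: if spec in specdup: score += 1; specdup.remove(spec)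
    -- remove cannot fail (membership is checked first), so getD never takes its default
    (peptidemasses.foldl (fun st spec =>
        if spec ∈ st.2 then (st.1 + 1, (PySem.List.remove? st.2 spec).getD st.2) else st)
      ((0 : Int), spectrum)).1

-- ===== PORT B =====
-- P = [0]; t = 0; for m in peptideseq: t += m; P.append(t)
def altPrefix (t : Int) : List Int → List Int
  | [] => [t]
  | m :: rest => t :: altPrefix (t + m) rest

-- d[v] = d.get(v, 0) + 1
def altStep (d : PySem.Dict Int Int) (v : Int) : PySem.Dict Int Int :=
  d.insert v (d.getD v 0 + 1)

def PeptideLinearScoring_alt (peptideseq : List Int) (spectrum : List Int) : Int :=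
  if peptideseq = [] then 0
  else
    let L : Int := peptideseq.length
    let P := altPrefix 0 peptideseq
    let t := peptideseq.sum          -- the loop's running total after the loop
    let frags := peptideseq.foldl altStep PySem.Dict.empty
    let frags := altStep frags t
    let frags := (PySem.List.pyRange 2 L 1).foldl (fun d len =>
        (P.zip (PySem.List.slice P (some len) none)).foldl
          (fun d p => altStep d (p.2 - p.1)) d) frags
    let speccnt := spectrum.foldl altStep PySem.Dict.empty
    (frags.items.map (fun p => min p.2 (speccnt.getD p.1 0))).sum

-- ===== PRECONDITION & SPEC =====
def Spec_PeptideLinearScoring (peptideseq : List Int) (spectrum : List Int) (out : Int) : Prop := out = PeptideLinearScoring_alt peptideseq spectrum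
instance (peptideseq : List Int) (spectrum : List Int) (out : Int) : Decidable (Spec_PeptideLinearScoring peptideseq spectrum out) := by unfold Spec_PeptideLinearScoring; infer_instance

-- ===== CLAIM (what is proved, stated in full; the proofs are below) =====
def Claim_equal_PeptideLinearScoring : Prop := ∀ (peptideseq : List Int) (spectrum : List Int), Dom_PeptideLinearScoring peptideseq spectrum → Spec_PeptideLinearScoring peptideseq spectrum (PeptideLinearScoring peptideseq spectrum)

-- ===== LEMMAS AND PROOFS =====

-- the window sums B produces for one window length (prefix-sum differences)
def winSums (l : List Int) (len : Int) : List Int :=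
  ((altPrefix 0 l).zip (PySem.List.slice (altPrefix 0 l) (some len) none)).map
    (fun p => p.2 - p.1)

-- the common fragment multiset, as a list
def fragList (l : List Int) : List Int :=
  l ++ [l.sum] ++ (PySem.List.pyRange 2 (l.length : Int) 1).flatMap (winSums l)

theorem altPrefix_eq (l : List Int) : ∀ t : Int,
    altPrefix t l = (List.range (l.length + 1)).map (fun j => t + (l.take j).sum) := by
  induction l with
  | nil => intro t; simp [altPrefix]
  | cons m rest ih =>
    intro t
    simp only [altPrefix, ih (t + m), List.length_cons]
    conv_rhs => rw [List.range_succ_eq_map]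
    simp [List.map_map, Function.comp_def, List.take_succ_cons, add_assoc]

theorem filter_range_lt (k : Nat) : ∀ n, k ≤ n →
    (List.range n).filter (fun j => decide (j < k)) = List.range k := by
  intro n
  induction n with
  | zero => intro h; simp [Nat.le_zero.mp h]
  | succ m ih =>
    intro h
    rcases Nat.lt_or_ge k (m + 1) with hlt | hge
    · rw [List.range_succ, List.filter_append, ih (by omega)]
      simp [Nat.not_lt.mpr (by omega : k ≤ m)]
    · have hk : k = m + 1 := by omega
      subst hk
      rw [List.filter_eq_self.mpr]
      intro a ha
      simp [List.mem_range.mp ha]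

-- A's inner loop for one window length equals B's prefix-sum differences
theorem inner_eq_winSums (l : List Int) (k : Nat) (h1 : 1 ≤ k) (h2 : k ≤ l.length) :
    ((List.range l.length).filter
        (fun (j : Nat) => decide (((PySem.List.slice l (some ((j : Nat) : Int)) (some (((j : Nat) : Int) + ((k : Nat) : Int)))).length : Int) = ((k : Nat) : Int)))).map
      (fun (j : Nat) => (PySem.List.slice l (some ((j : Nat) : Int)) (some (((j : Nat) : Int) + ((k : Nat) : Int)))).sum)
    = winSums l (k : Int) := by
  have hlenP : (altPrefix 0 l).length = l.length + 1 := by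
    rw [altPrefix_eq]; simp
  have hPget : ∀ j, ∀ hj : j < (altPrefix 0 l).length,
      (altPrefix 0 l)[j] = (l.take j).sum := by
    intro j hj
    rw [hlenP] at hj
    simp [altPrefix_eq]
  have hfilt : (List.range l.length).filter
      (fun (j : Nat) => decide (((PySem.List.slice l (some ((j : Nat) : Int)) (some (((j : Nat) : Int) + ((k : Nat) : Int)))).length : Int) = ((k : Nat) : Int)))
      = List.range (l.length + 1 - k) := by
    rw [List.filter_congr (q := fun (j : Nat) => decide (j < l.length + 1 - k)) ?_]
    · exact filter_range_lt _ _ (by omega)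
    · intro j hj
      rw [List.mem_range] at hj
      rw [PySem.List.slice_natCast_add]
      simp only [List.length_take, List.length_drop, decide_eq_decide]
      constructor
      · intro h; omega
      · intro h; omega
  rw [hfilt, winSums, PySem.List.slice_from_natCast]
  apply List.ext_getElem
  · simp [hlenP]
  · intro i h1 h2
    simp only [List.getElem_map, List.getElem_range, List.getElem_zip, List.getElem_drop]
    rw [PySem.List.slice_natCast_add, hPget, hPget]
    rw [Nat.add_comm k i, List.take_add, List.sum_append, add_sub_cancel_left]

-- score loop of A = multiset intersection cardinality
theorem scoreLoop_eq (ms : List Int) : ∀ (s : List Int) (sc : Int),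
    (ms.foldl (fun st spec =>
        if spec ∈ st.2 then (st.1 + 1, (PySem.List.remove? st.2 spec).getD st.2) else st)
      (sc, s)).1 = sc + (((ms : Multiset Int) ∩ (s : Multiset Int)).card : Int) := by
  induction ms with
  | nil => intro s sc; simp
  | cons m rest ih =>
    intro s sc
    by_cases hm : m ∈ s
    · rw [List.foldl_cons]
      simp only [hm, if_pos, PySem.List.remove?_eq_some_erase s m hm, Option.getD_some]
      rw [ih]
      have hc : ((m :: rest : List Int) : Multiset Int) ∩ (s : Multiset Int)
          = m ::ₘ ((rest : Multiset Int) ∩ ((s : Multiset Int).erase m)) :=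
        by rw [← Multiset.cons_coe]
           exact Multiset.cons_inter_of_pos _ (Multiset.mem_coe.mpr hm)
      rw [hc, Multiset.card_cons, Multiset.coe_erase]
      push_cast
      ring
    · rw [List.foldl_cons]
      simp only [hm, if_false, ih]
      have hc : ((m :: rest : List Int) : Multiset Int) ∩ (s : Multiset Int)
          = (rest : Multiset Int) ∩ (s : Multiset Int) :=
        by rw [← Multiset.cons_coe]
           exact Multiset.cons_inter_of_neg _ (by simpa using hm)
      rw [hc]

-- folding B's counting step from a counter extends the counted list
theorem altStep_eq : altStep = fun d x => d.insert x (d.getD x 0 + 1) := rfl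

theorem counter_foldl_append (base l : List Int) :
    l.foldl altStep (PySem.Dict.counter base) = PySem.Dict.counter (base ++ l) := by
  rw [altStep_eq,
      ← PySem.Dict.foldl_insert_getD_add_one_eq_counter base,
      ← List.foldl_append, PySem.Dict.foldl_insert_getD_add_one_eq_counter]

theorem counter_foldl_flat {β : Type} (xs : List β) (g : β → List Int) : ∀ base : List Int,
    xs.foldl (fun d x => (g x).foldl altStep d) (PySem.Dict.counter base)
      = PySem.Dict.counter (base ++ xs.flatMap g) := by
  induction xs with
  | nil => intro base; simp
  | cons x rest ih =>
    intro base
    rw [List.foldl_cons, counter_foldl_append, ih, List.flatMap_cons, List.append_assoc]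

-- multiset intersection cardinality as a sum of min-counts over the distinct values
theorem inter_card_eq (g s : List Int) :
    (((g : Multiset Int) ∩ (s : Multiset Int)).card : Int)
      = ((PySem.Set.ofList g).map (fun k => min ((g.count k : Int)) ((s.count k : Int)))).sum := by
  have hfin : ((g : Multiset Int) ∩ (s : Multiset Int)).toFinset ⊆ (g : Multiset Int).toFinset := by
    intro a ha
    simp only [Multiset.mem_toFinset] at ha ⊢
    exact (Multiset.mem_inter.mp ha).1
  have hN : ((g : Multiset Int) ∩ (s : Multiset Int)).card
      = ((PySem.Set.ofList g).map (fun k => min (g.count k) (s.count k))).sum := by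
    rw [← Multiset.toFinset_sum_count_eq]
    rw [Finset.sum_subset hfin (by
      intro x _ hx
      simp only [Multiset.mem_toFinset] at hx
      exact Multiset.count_eq_zero.mpr hx)]
    have hcnt : ∀ a : Int, ((g : Multiset Int) ∩ (s : Multiset Int)).count a
        = min (g.count a) (s.count a) := by
      intro a
      rw [Multiset.count_inter]
      simp
    rw [Finset.sum_congr rfl (fun a _ => hcnt a)]
    have hset : (g : Multiset Int).toFinset = (PySem.Set.ofList g).toFinset := by
      apply Finset.ext
      intro a
      simp [PySem.Set.mem_ofList]
    rw [hset, List.sum_toFinset _ (PySem.Set.nodup_ofList g)]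
  rw [hN]
  rw [Nat.cast_list_sum, List.map_map]
  congr 1
  apply List.map_congr_left
  intro k _
  simp [Nat.cast_min]

-- B's score equals the multiset intersection cardinality
theorem alt_sum_eq (g s : List Int) :
    (((PySem.Dict.counter g).items.map
        (fun p => min p.2 ((PySem.Dict.counter s).getD p.1 0))).sum : Int)
      = (((g : Multiset Int) ∩ (s : Multiset Int)).card : Int) := by
  rw [PySem.Dict.items_counter, List.map_map, inter_card_eq]
  congr 1
  apply List.map_congr_left
  intro k _
  simp [PySem.Dict.getD_counter]

-- A's generated (pre-sort) fragment list is exactly fragList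
theorem genA_eq (l : List Int) :
    GenerateLinearSpectra l = PySem.List.sorted (fragList l) (fun x => x) false := by
  simp only [GenerateLinearSpectra, fragList]
  rw [PySem.List.foldl_append_singleton_eq_self, List.nil_append]
  congr 1
  have hinner : ∀ (acc : List Int) (i : Int),
      (PySem.List.pyRange 0 (l.length : Int) 1).foldl (fun acc n =>
          if (((PySem.List.slice l (some n) (some (n + i))).length : Int) = i) then
            acc ++ [(PySem.List.slice l (some n) (some (n + i))).sum]
          else acc) acc
      = acc ++ ((PySem.List.pyRange 0 (l.length : Int) 1).filter
            (fun n => decide (((PySem.List.slice l (some n) (some (n + i))).length : Int) = i))).map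
          (fun n => (PySem.List.slice l (some n) (some (n + i))).sum) :=
    fun acc i => PySem.List.foldl_append_ite _ _ _ _
  rw [PySem.List.foldl_congr_mem _ _ (fun acc i =>
      acc ++ ((PySem.List.pyRange 0 (l.length : Int) 1).filter
            (fun n => decide (((PySem.List.slice l (some n) (some (n + i))).length : Int) = i))).map
          (fun n => (PySem.List.slice l (some n) (some (n + i))).sum)) _
      (fun acc i hi => hinner acc i)]
  rw [PySem.List.foldl_append_eq_flatMap]
  congr 1
  apply List.flatMap_congr
  intro i hi
  have hmem := (PySem.List.mem_pyRange_one).mp hi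
  obtain ⟨k, rfl⟩ : ∃ k : Nat, i = (k : Int) := ⟨i.toNat, by omega⟩
  have hk1 : 1 ≤ k := by exact_mod_cast by omega
  have hk2 : k ≤ l.length := by exact_mod_cast by omega
  rw [PySem.List.pyRange_zero_nat, List.filter_map, List.map_map]
  simp only [Function.comp_def]
  exact inner_eq_winSums l k hk1 hk2

-- ===== VERDICT (by name: the statement is the Claim_ definition above) =====
theorem PeptideLinearScoring_spec : Claim_equal_PeptideLinearScoring := by
  intro peptideseq spectrum _
  unfold Spec_PeptideLinearScoring PeptideLinearScoring PeptideLinearScoring_alt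
  by_cases hne : peptideseq = []
  · simp [hne]
  · simp only [hne, if_false]
    rw [genA_eq, scoreLoop_eq, zero_add]
    have hperm : ((PySem.List.sorted (fragList peptideseq) (fun x => x) false : List Int) : Multiset Int)
        = ((fragList peptideseq : List Int) : Multiset Int) :=
      Multiset.coe_eq_coe.mpr (PySem.List.sorted_perm _ _ _)
    rw [hperm]
    -- now compute B's side into counters of fragList
    have hb0 : peptideseq.foldl altStep PySem.Dict.empty = PySem.Dict.counter peptideseq := by
      rw [altStep_eq, PySem.Dict.foldl_insert_getD_add_one_eq_counter]
    have hb1 : altStep (PySem.Dict.counter peptideseq) peptideseq.sum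
        = PySem.Dict.counter (peptideseq ++ [peptideseq.sum]) := by
      rw [← counter_foldl_append peptideseq [peptideseq.sum]]
      rfl
    have hb2 : (PySem.List.pyRange 2 (peptideseq.length : Int) 1).foldl (fun d len =>
          ((altPrefix 0 peptideseq).zip
              (PySem.List.slice (altPrefix 0 peptideseq) (some len) none)).foldl
            (fun d p => altStep d (p.2 - p.1)) d)
          (PySem.Dict.counter (peptideseq ++ [peptideseq.sum]))
        = PySem.Dict.counter (fragList peptideseq) := by
      have hstep : (fun (d : PySem.Dict Int Int) (len : Int) =>
            ((altPrefix 0 peptideseq).zip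
                (PySem.List.slice (altPrefix 0 peptideseq) (some len) none)).foldl
              (fun d p => altStep d (p.2 - p.1)) d)
          = fun d len => (winSums peptideseq len).foldl altStep d := by
        funext d len
        rw [winSums, List.foldl_map]
      rw [hstep, counter_foldl_flat, fragList, List.append_assoc]
    have hbs : spectrum.foldl altStep PySem.Dict.empty = PySem.Dict.counter spectrum := by
      rw [altStep_eq, PySem.Dict.foldl_insert_getD_add_one_eq_counter]
    rw [hb0, hb1, hb2, hbs, alt_sum_eq]
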